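-- pv_equiv track=rewrite | github.com/basilegithub/General-number-field-sieve | src/utils.py | dense_multiply
-- ===== SOURCE A (Python) =====
-- def dense_multiply(A, B):
--     C = [0]*len(A)
--     for i in range(len(A)):
--         tmp = 0
--         for j in range(len(B)):
--             if (A[i] >> len(B)-j-1)&1:
--                     tmp ^= B[j]
--         C[i] = tmp
--     return C
-- ===== SOURCE B (Python) =====
-- def _gf2_tables(rows, t):
--     # XOR lookup tables for consecutive chunks of t rows (Method of Four Russians).
--     if not rows:
--         return []
--     tbl = [0]
--     for row in rows[:t]:
--         tbl = tbl + [x ^ row for x in tbl]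
--     return [tbl] + _gf2_tables(rows[t:], t)
--
--
-- def _gf2_lookup(tables, v, t):
--     chunk_mask = (1 << t) - 1
--     acc = 0
--     for tbl in tables:
--         acc ^= tbl[v & chunk_mask]
--         v >>= t
--     return acc
--
--
-- def dense_multiply(A, B):
--     t = 8
--     rows = B[::-1]            # rows[k] is the B-row selected by bit k of the mask
--     tables = _gf2_tables(rows, t)
--     mask = (1 << len(B)) - 1
--     return [_gf2_lookup(tables, a & mask, t) for a in A]
-- ===== Notes on version B (the rewrite author's own statement) =====
-- stated objective: faster
-- what changed: Replaces A's per-bit test-and-XOR inner loop with the Method of Four Russians: B's rows are reversed, grouped into blocks of 8, a 256-entry XOR lookup table is precomputed per block, and each output entry is the XOR of one table lookup per block of the masked row mask.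
import Mathlib
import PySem

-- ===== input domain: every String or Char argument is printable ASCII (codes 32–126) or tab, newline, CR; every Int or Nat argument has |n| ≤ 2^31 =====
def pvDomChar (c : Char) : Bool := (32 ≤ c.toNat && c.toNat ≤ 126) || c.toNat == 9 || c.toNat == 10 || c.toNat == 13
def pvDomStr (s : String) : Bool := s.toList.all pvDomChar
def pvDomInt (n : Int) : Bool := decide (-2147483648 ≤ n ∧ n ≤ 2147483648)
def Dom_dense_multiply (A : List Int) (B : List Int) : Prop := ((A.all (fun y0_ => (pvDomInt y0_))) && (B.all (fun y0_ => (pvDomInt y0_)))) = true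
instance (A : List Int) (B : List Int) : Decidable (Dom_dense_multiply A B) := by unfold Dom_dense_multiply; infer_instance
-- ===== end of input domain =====

-- B re-implements the GF(2) matrix-vector product by the Method of Four Russians: one XOR
-- lookup table per block of 8 rows of B, then one table lookup per block per entry of A,
-- instead of A's one test-and-XOR per bit.

-- ===== PORT A =====
def dense_multiply (A : List Int) (B : List Int) : List Int :=
  let C := List.replicate A.length (0 : Int)
  (PySem.List.pyRange 0 (A.length : Int) 1).foldl (fun C i =>
    let tmp : Int := (PySem.List.pyRange 0 (B.length : Int) 1).foldl (fun tmp j =>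
      -- 'A[i] >> len(B)-j-1': the shift count is nonnegative for every j in range, so .toNat is exact
      if PySem.Int.band ((PySem.List.pyGetD A i 0) >>> ((B.length : Int) - j - 1).toNat) 1 ≠ 0 then
        PySem.Int.bxor tmp (PySem.List.pyGetD B j 0)
      else tmp) 0
    C.set i.toNat tmp) C

-- ===== PORT B =====
-- _gf2_tables(rows, 8): XOR lookup tables for consecutive blocks of 8 rows
def pvGf2Tables (rows : List Int) : List (List Int) :=
  if h : rows = [] then []
  else
    ((rows.take 8).foldl (fun tbl row => tbl ++ tbl.map (fun x => PySem.Int.bxor x row)) [0])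
      :: pvGf2Tables (rows.drop 8)
termination_by rows.length
decreasing_by
  simp only [List.length_drop]
  have : rows.length ≠ 0 := fun h0 => h (List.eq_nil_of_length_eq_zero h0)
  omega

-- _gf2_lookup(tables, v, 8)
def pvGf2Lookup (tables : List (List Int)) (v : Int) : Int :=
  let chunkMask : Int := (1 <<< (8 : Nat)) - 1
  (tables.foldl (fun (s : Int × Int) tbl =>
      (PySem.Int.bxor s.1 (PySem.List.pyGetD tbl (PySem.Int.band s.2 chunkMask) 0), s.2 >>> (8 : Nat)))
    ((0 : Int), v)).1

def dense_multiply_alt (A : List Int) (B : List Int) : List Int :=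
  let rows := B.reverse
  let tables := pvGf2Tables rows
  let mask : Int := (1 <<< B.length) - 1
  A.map (fun a => pvGf2Lookup tables (PySem.Int.band a mask))

-- ===== PRECONDITION & SPEC =====
def Spec_dense_multiply (A : List Int) (B : List Int) (out : List Int) : Prop := out = dense_multiply_alt A B
instance (A : List Int) (B : List Int) (out : List Int) : Decidable (Spec_dense_multiply A B out) := by unfold Spec_dense_multiply; infer_instance

-- ===== CLAIM (what is proved, stated in full; the proofs are below) =====
def Claim_equal_dense_multiply : Prop := ∀ (A : List Int) (B : List Int), Dom_dense_multiply A B → Spec_dense_multiply A B (dense_multiply A B)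

-- ===== LEMMAS AND PROOFS =====

-- A's inner loop over j, as a function of the current row mask a.
def innerA (a : Int) (B : List Int) : Int :=
  (PySem.List.pyRange 0 (B.length : Int) 1).foldl (fun tmp j =>
    if PySem.Int.band (a >>> ((B.length : Int) - j - 1).toNat) 1 ≠ 0 then
      PySem.Int.bxor tmp (PySem.List.pyGetD B j 0)
    else tmp) 0

-- reference value: XOR of the rows selected by the low bits of v (bit k picks rows[k])
def specXor : List Int → Nat → Int
  | [], _ => 0
  | r :: rs, v => PySem.Int.bxor (if v % 2 = 1 then r else 0) (specXor rs (v / 2))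

-- --- bxor algebra ---
lemma bxor_ofNat_ofNat (m n : Nat) :
    PySem.Int.bxor (Int.ofNat m) (Int.ofNat n) = Int.ofNat (m ^^^ n) := by
  simp [PySem.Int.bxor]

lemma bxor_ofNat_negSucc (m n : Nat) :
    PySem.Int.bxor (Int.ofNat m) (Int.negSucc n) = Int.negSucc (m ^^^ n) := by
  simp [PySem.Int.bxor, Int.negSucc_eq]
  rw [if_neg (by omega)]
  omega

lemma bxor_negSucc_ofNat (m n : Nat) :
    PySem.Int.bxor (Int.negSucc m) (Int.ofNat n) = Int.negSucc (m ^^^ n) := by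
  simp [PySem.Int.bxor, Int.negSucc_eq]
  rw [if_neg (by omega)]
  omega

lemma bxor_negSucc_negSucc (m n : Nat) :
    PySem.Int.bxor (Int.negSucc m) (Int.negSucc n) = Int.ofNat (m ^^^ n) := by
  simp [PySem.Int.bxor, Int.negSucc_eq]
  split_ifs <;> omega

lemma bxor_assoc (a b c : Int) :
    PySem.Int.bxor (PySem.Int.bxor a b) c = PySem.Int.bxor a (PySem.Int.bxor b c) := by
  cases a <;> cases b <;> cases c <;>
    simp only [bxor_ofNat_ofNat, bxor_ofNat_negSucc, bxor_negSucc_ofNat,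
      bxor_negSucc_negSucc, Nat.xor_assoc]

lemma zero_bxor (a : Int) : PySem.Int.bxor 0 a = a := by
  rw [PySem.Int.bxor_comm, PySem.Int.bxor_zero]

-- --- specXor structure ---
lemma specXor_append (xs ys : List Int) (v : Nat) :
    specXor (xs ++ ys) v = PySem.Int.bxor (specXor xs v) (specXor ys (v / 2 ^ xs.length)) := by
  induction xs generalizing v with
  | nil => simp [specXor, zero_bxor]
  | cons x xs ih =>
      simp only [List.cons_append, specXor, ih, List.length_cons]
      rw [bxor_assoc, Nat.div_div_eq_div_mul]
      ring_nf

lemma specXor_high (rows : List Int) (m x q : Nat) (h : rows.length ≤ m) :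
    specXor rows (x + 2 ^ m * q) = specXor rows x := by
  induction rows generalizing m x q with
  | nil => rfl
  | cons r rs ih =>
      obtain ⟨m', rfl⟩ : ∃ m', m = m' + 1 := by
        cases m with
        | zero => simp at h
        | succ m' => exact ⟨m', rfl⟩
      have h2 : 2 ^ (m' + 1) * q = (2 ^ m' * q) * 2 := by ring
      simp only [specXor, h2]
      rw [Nat.add_mul_mod_self_right, Nat.add_mul_div_right _ _ (by omega : 0 < 2)]
      rw [ih _ _ _ (by simpa using Nat.lt_succ_iff.mp (Nat.lt_of_lt_of_le (Nat.lt_succ_self _) (by simpa using h)))]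

-- --- A-side: the set-loop is a map, and the inner loop computes specXor ---
lemma foldl_bxor_init {ι : Type} (h : Int → ι → Int)
    (hh : ∀ x j, h x j = PySem.Int.bxor x (h 0 j)) :
    ∀ (l : List ι) (x : Int), l.foldl h x = PySem.Int.bxor x (l.foldl h 0) := by
  intro l
  induction l with
  | nil => intro x; simp [PySem.Int.bxor_zero]
  | cons j l ih =>
      intro x
      simp only [List.foldl_cons]
      rw [ih (h x j), ih (h 0 j), hh x j, bxor_assoc]

lemma foldl_bxor_init' {ι : Type} (p : ι → Prop) [DecidablePred p] (g : ι → Int)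
    (l : List ι) (x : Int) :
    l.foldl (fun tmp j => if p j then PySem.Int.bxor tmp (g j) else tmp) x
      = PySem.Int.bxor x (l.foldl (fun tmp j => if p j then PySem.Int.bxor tmp (g j) else tmp) 0) := by
  apply foldl_bxor_init
  intro y j
  dsimp only
  split_ifs
  · rw [zero_bxor]
  · rw [PySem.Int.bxor_zero]

lemma foldl_set_eq (g : Nat → Int) :
    ∀ (m : Nat) (C : List Int), m ≤ C.length →
      (List.range m).foldl (fun C i => C.set i (g i)) C = (List.range m).map g ++ C.drop m := by
  intro m
  induction m with
  | zero => intro C _; simp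
  | succ m ih =>
      intro C hm
      rw [List.range_succ, List.foldl_append, List.foldl_cons, List.foldl_nil,
        ih C (by omega), List.map_append]
      rw [List.set_append, if_neg (by simp)]
      simp only [List.length_map, List.length_range, Nat.sub_self]
      rw [List.drop_eq_getElem_cons (by omega : m < C.length), List.set_cons_zero]
      simp

lemma portA_map (A B : List Int) :
    dense_multiply A B = A.map (fun a => innerA a B) := by
  show (PySem.List.pyRange 0 (A.length : Int) 1).foldl
      (fun C i => C.set i.toNat (innerA (PySem.List.pyGetD A i 0) B))
      (List.replicate A.length (0 : Int)) = A.map (fun a => innerA a B)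
  rw [PySem.List.pyRange_zero_natCast, List.foldl_map]
  simp only [Int.toNat_natCast]
  rw [foldl_set_eq (fun i => innerA (PySem.List.pyGetD A (i : Int) 0) B) A.length
      (List.replicate A.length 0) (by simp)]
  simp only [List.drop_eq_nil_of_le (by simp : (List.replicate A.length (0:Int)).length ≤ A.length),
    List.append_nil]
  apply List.ext_getElem (by simp)
  intro i h1 h2
  simp only [List.getElem_map, List.getElem_range]
  rw [PySem.List.pyGetD_natCast, List.getD_eq_getElem _ _ (by simpa using h2)]

lemma innerA_cons (a b : Int) (B' : List Int) :
    innerA a (b :: B') =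
      PySem.Int.bxor (if PySem.Int.band (a >>> B'.length) 1 ≠ 0 then b else 0) (innerA a B') := by
  unfold innerA
  simp only [List.length_cons]
  rw [PySem.List.pyRange_zero_natCast, List.range_succ_eq_map, List.map_cons, List.foldl_cons,
    List.foldl_map, List.foldl_map]
  rw [PySem.List.pyRange_zero_natCast, List.foldl_map]
  have h0 : (((B'.length + 1 : Nat) : Int) - ((0:Nat) : Int) - 1).toNat = B'.length := by
    push_cast; omega
  have hB0 : PySem.List.pyGetD (b :: B') ((0:Nat) : Int) 0 = b := by
    rw [PySem.List.pyGetD_natCast]; rfl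
  simp only [h0, hB0, zero_bxor]
  refine (foldl_bxor_init' _ _ _ _).trans ?_
  refine congrArg _ ?_
  apply List.foldl_ext
  intro tmp k _
  have hidx : (((B'.length + 1 : Nat) : Int) - ((Nat.succ k : Nat) : Int) - 1).toNat
      = (((B'.length : Nat) : Int) - ((k : Nat) : Int) - 1).toNat := by push_cast; omega
  rw [hidx, PySem.List.pyGetD_natCast, PySem.List.pyGetD_natCast, List.getD_cons_succ]

lemma innerA_spec : ∀ (B : List Int) (a : Int) (v : Nat),
    (∀ k, k < B.length → (PySem.Int.band (a >>> k) 1 ≠ 0 ↔ v / 2 ^ k % 2 = 1)) →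
    innerA a B = specXor B.reverse v := by
  intro B
  induction B with
  | nil => intro a v _; rfl
  | cons b B' ih =>
      intro a v hbits
      rw [innerA_cons, List.reverse_cons, specXor_append]
      rw [ih a v (fun k hk => hbits k (by simp; omega))]
      simp only [List.length_reverse]
      have hone : specXor [b] (v / 2 ^ B'.length)
          = if v / 2 ^ B'.length % 2 = 1 then b else 0 := by
        simp only [specXor, PySem.Int.bxor_zero]
      rw [hone, PySem.Int.bxor_comm]
      congr 1
      by_cases hc : v / 2 ^ B'.length % 2 = 1
      · rw [if_pos hc, if_pos ((hbits B'.length (by simp)).mpr hc)]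
      · rw [if_neg hc, if_neg (fun hne => hc ((hbits B'.length (by simp)).mp hne))]

-- --- B-side: the tables and the lookup compute specXor ---
lemma tables_chunk (chunk : List Int) :
    chunk.foldl (fun tbl row => tbl ++ tbl.map (fun x => PySem.Int.bxor x row)) [0]
      = (List.range (2 ^ chunk.length)).map (fun x => specXor chunk x) := by
  induction chunk using List.reverseRecOn with
  | nil => simp [specXor]
  | append_singleton l r ih =>
      rw [List.foldl_append, List.foldl_cons, List.foldl_nil, ih]
      have hlen : (l ++ [r]).length = l.length + 1 := by simp
      rw [hlen, pow_succ, Nat.mul_two, List.range_add, List.map_append,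
        List.map_map, List.map_map]
      congr 1
      · apply List.map_congr_left
        intro x hx
        have hxlt : x < 2 ^ l.length := List.mem_range.mp hx
        rw [specXor_append, Nat.div_eq_of_lt hxlt]
        simp [specXor, PySem.Int.bxor_zero]
      · apply List.map_congr_left
        intro x hx
        have hxlt : x < 2 ^ l.length := List.mem_range.mp hx
        simp only [Function.comp]
        rw [specXor_append]
        have h1 : 2 ^ l.length + x = x + 2 ^ l.length * 1 := by ring
        have h2 : (2 ^ l.length + x) / 2 ^ l.length = 1 := by
          rw [Nat.add_comm, Nat.add_div_right _ (Nat.pow_pos (by omega)), Nat.div_eq_of_lt hxlt]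
        rw [h1, specXor_high l _ x 1 le_rfl, ← h1, h2]
        simp [specXor, PySem.Int.bxor_zero]

lemma lookup_fold_fst : ∀ (tables : List (List Int)) (x v : Int),
    (tables.foldl (fun (s : Int × Int) tbl =>
        (PySem.Int.bxor s.1 (PySem.List.pyGetD tbl (PySem.Int.band s.2 ((1 <<< (8:Nat)) - 1)) 0), s.2 >>> (8:Nat)))
      (x, v)).1
    = PySem.Int.bxor x ((tables.foldl (fun (s : Int × Int) tbl =>
        (PySem.Int.bxor s.1 (PySem.List.pyGetD tbl (PySem.Int.band s.2 ((1 <<< (8:Nat)) - 1)) 0), s.2 >>> (8:Nat)))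
      ((0 : Int), v)).1) := by
  intro tables
  induction tables with
  | nil => intro x v; simp [PySem.Int.bxor_zero]
  | cons tbl rest ih =>
      intro x v
      simp only [List.foldl_cons]
      rw [ih (PySem.Int.bxor x _) (v >>> (8:Nat)), ih (PySem.Int.bxor 0 _) (v >>> (8:Nat)),
        zero_bxor, bxor_assoc]

lemma lookup_cons (tbl : List Int) (rest : List (List Int)) (v : Int) :
    pvGf2Lookup (tbl :: rest) v =
      PySem.Int.bxor (PySem.List.pyGetD tbl (PySem.Int.band v ((1 <<< (8:Nat)) - 1)) 0)
        (pvGf2Lookup rest (v >>> (8:Nat))) := by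
  simp only [pvGf2Lookup, List.foldl_cons]
  rw [lookup_fold_fst, zero_bxor]

lemma lookup_spec : ∀ (N : Nat) (rows : List Int) (v : Nat), rows.length ≤ N → v < 2 ^ rows.length →
    pvGf2Lookup (pvGf2Tables rows) (v : Int) = specXor rows v := by
  intro N
  induction N with
  | zero =>
      intro rows v hN hv
      have : rows = [] := List.eq_nil_of_length_eq_zero (by omega)
      subst this
      have hv0 : v = 0 := by simpa using hv
      subst hv0
      rw [pvGf2Tables]
      rfl
  | succ N ih =>
      intro rows v hN hv
      by_cases hnil : rows = []
      · subst hnil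
        have hv0 : v = 0 := by simpa using hv
        subst hv0
        rw [pvGf2Tables]
        rfl
      · rw [pvGf2Tables, dif_neg hnil, lookup_cons]
        have h255 : ((1 <<< (8:Nat) : Int) - 1) = ((255 : Nat) : Int) := by decide
        have hband : PySem.Int.band ((v : Nat) : Int) ((1 <<< (8:Nat)) - 1) = ((v &&& 255 : Nat) : Int) := by
          rw [h255]; exact PySem.Int.band_natCast v 255
        have hand : v &&& 255 = v % 256 := by
          have : (255 : Nat) = 2 ^ 8 - 1 := by norm_num
          rw [this]; exact Nat.and_two_pow_sub_one_eq_mod v 8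
        have hshift : ((v : Nat) : Int) >>> (8:Nat) = ((v >>> 8 : Nat) : Int) := rfl
        have hdiv : v >>> 8 = v / 256 := by
          rw [Nat.shiftRight_eq_div_pow]
        rw [hband, hand, hshift, hdiv, tables_chunk, PySem.List.pyGetD_natCast]
        by_cases hle : rows.length ≤ 8
        · have htake : rows.take 8 = rows := List.take_of_length_le hle
          have hdrop : rows.drop 8 = [] := List.drop_eq_nil_of_le hle
          have hvlt : v < 256 := lt_of_lt_of_le hv (by
            calc 2 ^ rows.length ≤ 2 ^ 8 := Nat.pow_le_pow_right (by omega) hle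
            _ = 256 := by norm_num)
          rw [htake, hdrop]
          have htz : pvGf2Tables ([] : List Int) = [] := by rw [pvGf2Tables]; simp
          rw [htz]
          have hlk : pvGf2Lookup [] ((v / 256 : Nat) : Int) = 0 := rfl
          rw [hlk, PySem.Int.bxor_zero, Nat.mod_eq_of_lt hvlt,
            List.getD_eq_getElem _ _ (by simpa using hv), List.getElem_map, List.getElem_range]
        · push Not at hle
          have htlen : (rows.take 8).length = 8 := by simp; omega
          have hvm : v % 256 < 2 ^ (rows.take 8).length := by
            rw [htlen]; exact Nat.mod_lt _ (by norm_num)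
          rw [List.getD_eq_getElem _ _ (by simpa using hvm), List.getElem_map, List.getElem_range]
          have hspec : specXor (rows.take 8) (v % 256) = specXor (rows.take 8) v := by
            conv_rhs => rw [show v = v % 256 + 2 ^ 8 * (v / 256) by
              rw [show (2:Nat)^8 = 256 by norm_num]; exact (Nat.mod_add_div v 256).symm]
            rw [specXor_high _ 8 _ _ (by omega)]
          have hdl : (rows.drop 8).length = rows.length - 8 := by simp
          have hrec : pvGf2Lookup (pvGf2Tables (rows.drop 8)) ((v / 256 : Nat) : Int)
              = specXor (rows.drop 8) (v / 256) := by
            apply ih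
            · omega
            · rw [hdl]
              rw [Nat.div_lt_iff_lt_mul (by norm_num : 0 < 256)]
              calc v < 2 ^ rows.length := hv
              _ = 2 ^ (rows.length - 8) * 256 := by
                  rw [show (256:Nat) = 2^8 by norm_num, ← pow_add]
                  congr 1; omega
          rw [hrec, hspec]
          conv_rhs => rw [show rows = rows.take 8 ++ rows.drop 8 from (List.take_append_drop 8 rows).symm]
          rw [specXor_append, htlen]
          norm_num

-- --- arithmetic bridges (Python '&', '>>' against emod/ediv) ---
lemma band_mask (a : Int) (n : Nat) :
    PySem.Int.band a ((1 <<< n) - 1) = a % ((2 ^ n : Nat) : Int) := by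
  have hmask : ((1 <<< n : Int)) - 1 = ((2 ^ n - 1 : Nat) : Int) := by
    have h1 : (1 <<< n : Int) = ((1 <<< n : Nat) : Int) := rfl
    rw [h1, Nat.shiftLeft_eq, one_mul]
    have h2 : 1 ≤ 2 ^ n := Nat.one_le_two_pow
    omega
  rw [hmask]
  by_cases ha : 0 ≤ a
  · obtain ⟨m, rfl⟩ := Int.eq_ofNat_of_zero_le ha
    have hb : PySem.Int.band ((m : Nat) : Int) ((2 ^ n - 1 : Nat) : Int) = ((m &&& (2 ^ n - 1) : Nat) : Int) :=
      PySem.Int.band_natCast m (2 ^ n - 1)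
    rw [hb, Nat.and_two_pow_sub_one_eq_mod]
    exact Int.natCast_emod m (2 ^ n)
  · simp only [PySem.Int.band, if_neg ha,
      if_pos (show (0:Int) ≤ ((2 ^ n - 1 : Nat) : Int) from by positivity)]
    rw [Int.toNat_natCast]
    set a' : Nat := (-a - 1).toNat with ha'
    have haa : a = -(a' : Int) - 1 := by omega
    have hland : (2 ^ n - 1) &&& a' = a' % 2 ^ n := by
      rw [Nat.land_comm]; exact Nat.and_two_pow_sub_one_eq_mod a' n
    rw [hland]
    have hpos : 0 < 2 ^ n := Nat.pow_pos (by omega)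
    have hr : a' % 2 ^ n < 2 ^ n := Nat.mod_lt _ hpos
    have hda : ((2 ^ n : Nat) : Int) * ((a' / 2 ^ n : Nat) : Int) + ((a' % 2 ^ n : Nat) : Int) = (a' : Int) := by
      exact_mod_cast Nat.div_add_mod a' (2 ^ n)
    have hsplit : a = ((2 ^ n - 1 - a' % 2 ^ n : Nat) : Int)
        + ((2 ^ n : Nat) : Int) * (-((a' / 2 ^ n : Nat) : Int) - 1) := by
      rw [haa]
      have hc : ((2 ^ n - 1 - a' % 2 ^ n : Nat) : Int)
          = ((2 ^ n : Nat) : Int) - 1 - ((a' % 2 ^ n : Nat) : Int) := by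
        have h1 : a' % 2 ^ n ≤ 2 ^ n - 1 := by omega
        omega
      rw [hc]
      linear_combination hda
    rw [hsplit, Int.add_mul_emod_self_left,
      Int.emod_eq_of_lt (by positivity) (by exact_mod_cast (by omega : 2 ^ n - 1 - a' % 2 ^ n < 2 ^ n))]

lemma bit_emod (a : Int) (n k : Nat) (hk : k < n) :
    (a % ((2 ^ n : Nat) : Int)) / ((2 ^ k : Nat) : Int) % 2 = a / ((2 ^ k : Nat) : Int) % 2 := by
  set Q : Int := ((2 ^ k : Nat) : Int) with hQdef
  set P : Int := ((2 ^ n : Nat) : Int) with hPdef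
  have hQ0 : Q ≠ 0 := by
    have : (0:Int) < Q := by rw [hQdef]; exact_mod_cast Nat.pow_pos (by omega)
    omega
  set w : Int := a / P with hw
  have hN : (2 ^ n : Nat) = 2 ^ (n - k) * 2 ^ k := by
    rw [← pow_add]; congr 1; omega
  have h2 : P = ((2 ^ (n - k) : Nat) : Int) * Q := by
    rw [hPdef, hQdef]; exact_mod_cast hN
  have hkey : a % P / Q = a / Q + 2 * (((2 ^ (n - k - 1) : Nat) : Int) * (-w)) := by
    rw [Int.emod_def, ← hw, h2]
    have hnum : a - ((2 ^ (n - k) : Nat) : Int) * Q * w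
        = a + (((2 ^ (n - k) : Nat) : Int) * (-w)) * Q := by ring
    rw [hnum, Int.add_mul_ediv_right _ _ hQ0]
    have hsplit2 : (2 ^ (n - k) : Nat) = 2 * 2 ^ (n - k - 1) := by
      rw [← pow_succ']; congr 1; omega
    rw [hsplit2]
    push_cast
    ring
  rw [hkey, Int.add_mul_emod_self_left]

lemma elem_eq (a : Int) (B : List Int) :
    innerA a B = pvGf2Lookup (pvGf2Tables B.reverse) (PySem.Int.band a ((1 <<< B.length) - 1)) := by
  rw [band_mask]
  set n := B.length with hn
  set v : Int := a % ((2 ^ n : Nat) : Int) with hv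
  have hpos : (0:Int) < ((2 ^ n : Nat) : Int) := by exact_mod_cast Nat.pow_pos (by omega)
  have hv0 : 0 ≤ v := Int.emod_nonneg a (by omega)
  have hvlt : v < ((2 ^ n : Nat) : Int) := Int.emod_lt_of_pos a hpos
  have hcast : v = ((v.toNat : Nat) : Int) := (Int.toNat_of_nonneg hv0).symm
  have hvn : v.toNat < 2 ^ B.reverse.length := by
    rw [List.length_reverse, ← hn]; omega
  rw [hcast, lookup_spec B.reverse.length _ _ le_rfl hvn]
  apply innerA_spec
  intro k hk
  rw [← hn] at hk
  have h1 : PySem.Int.band (a >>> k) 1 = PySem.Int.mod (a >>> k) 2 := PySem.Int.band_one _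
  have h2 : PySem.Int.mod (a >>> k) 2 = (a >>> k) % 2 := PySem.Int.mod_eq_emod_of_pos (by omega)
  have h3 : (a >>> k) = a / ((2 ^ k : Nat) : Int) := by
    rw [Int.shiftRight_eq_div_pow]
  have h4 : ((v.toNat / 2 ^ k % 2 : Nat) : Int) = a / ((2 ^ k : Nat) : Int) % 2 := by
    calc ((v.toNat / 2 ^ k % 2 : Nat) : Int)
        = ((v.toNat / 2 ^ k : Nat) : Int) % ((2 : Nat) : Int) := Int.natCast_emod _ _
      _ = ((v.toNat : Nat) : Int) / ((2 ^ k : Nat) : Int) % ((2 : Nat) : Int) := by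
          rw [Int.natCast_ediv]
      _ = v / ((2 ^ k : Nat) : Int) % 2 := by rw [← hcast]; norm_num
      _ = a / ((2 ^ k : Nat) : Int) % 2 := by rw [hv]; exact bit_emod a n k hk
  rw [h1, h2, h3]
  rcases Int.emod_two_eq (a / ((2 ^ k : Nat) : Int)) with hx | hx <;> omega

-- ===== VERDICT (by name: the statement is the Claim_ definition above) =====
theorem dense_multiply_spec : Claim_equal_dense_multiply := by
  intro A B _
  unfold Spec_dense_multiply
  rw [portA_map]
  simp only [dense_multiply_alt]
  exact List.map_congr_left (fun a _ => elem_eq a B)
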